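-- pv_equiv track=rewrite | github.com/MathCancer/PhysiCell | sample_projects_intracellular/boolean/tutorial/scripts/tools.py | to_bits
-- ===== SOURCE A (Python) =====
-- def to_bits(state, nodes):
--     if state == "<nil>":
--         return tuple([0]*len(nodes))
--     bits = []
--     state_list = state.split(" -- ")
--     for node in nodes:
--         bits.append(1 if node in state_list else 0)
--     return tuple(bits)
-- ===== SOURCE B (Python) =====
-- def to_bits(state, nodes):
--     if state == "<nil>":
--         return tuple([0]*len(nodes))
--     index = {}
--     for i, node in enumerate(nodes):
--         index.setdefault(node, []).append(i)
--     bits = [0]*len(nodes)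
--     for token in state.split(" -- "):
--         for i in index.get(token, []):
--             bits[i] = 1
--     return tuple(bits)
-- ===== Notes on version B (the rewrite author's own statement) =====
-- stated objective: alternative
-- what changed: B inverts the traversal: it builds a node->positions index once, then loops over the state's tokens setting bits at the recorded positions, instead of A's per-node membership scan of the token list.
import Mathlib
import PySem

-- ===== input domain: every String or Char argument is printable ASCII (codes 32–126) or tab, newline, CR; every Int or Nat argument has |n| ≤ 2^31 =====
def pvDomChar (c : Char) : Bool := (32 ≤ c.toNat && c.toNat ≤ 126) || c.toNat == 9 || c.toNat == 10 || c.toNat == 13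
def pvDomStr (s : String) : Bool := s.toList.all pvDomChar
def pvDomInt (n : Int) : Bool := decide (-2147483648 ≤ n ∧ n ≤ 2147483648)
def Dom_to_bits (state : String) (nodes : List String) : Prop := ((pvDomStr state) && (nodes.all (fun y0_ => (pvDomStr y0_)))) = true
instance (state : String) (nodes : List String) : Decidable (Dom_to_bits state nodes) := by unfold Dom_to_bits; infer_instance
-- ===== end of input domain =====

-- B inverts the traversal: a node->positions index is built once, then the state's tokens
-- set bits at the recorded positions (alternative decomposition; not claimed faster).


-- s.split(" -- "): the separator is a nonempty literal, so PySem.Str.split? is always `some`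
def pvSplitTokens (s : String) : List String := (PySem.Str.split? s " -- ").getD []

-- ===== PORT A =====
def to_bits (state : String) (nodes : List String) : List Int :=
  if state == "<nil>" then List.replicate nodes.length 0
  else
    let state_list := pvSplitTokens state
    nodes.foldl (fun bits node => bits ++ [if node ∈ state_list then (1 : Int) else 0]) []

-- ===== PORT B =====
-- index.setdefault(node, []).append(i): insert keeps the key's position, so this is
-- d.insert node (d.getD node [] ++ [i]).
def pvBuildIndex (nodes : List String) : PySem.Dict String (List Int) :=
  (PySem.List.enumerate nodes).foldl
    (fun d p => d.insert p.2 ((d.getD p.2 []) ++ [p.1])) PySem.Dict.empty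

-- inner loop 'for i in index.get(token, []): bits[i] = 1' (indices from enumerate are ≥ 0 and in range)
def pvSetOnes (positions : List Int) (bits : List Int) : List Int :=
  positions.foldl (fun b i => b.set i.toNat 1) bits

def to_bits_alt (state : String) (nodes : List String) : List Int :=
  if state == "<nil>" then List.replicate nodes.length 0
  else
    let index := pvBuildIndex nodes
    let bits := List.replicate nodes.length (0 : Int)
    (pvSplitTokens state).foldl (fun b token => pvSetOnes (index.getD token []) b) bits

-- ===== PRECONDITION & SPEC =====
def Spec_to_bits (state : String) (nodes : List String) (out : List Int) : Prop := out = to_bits_alt state nodes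
instance (state : String) (nodes : List String) (out : List Int) : Decidable (Spec_to_bits state nodes out) := by unfold Spec_to_bits; infer_instance

-- ===== CLAIM (what is proved, stated in full; the proofs are below) =====
def Claim_equal_to_bits : Prop := ∀ (state : String) (nodes : List String), Dom_to_bits state nodes → Spec_to_bits state nodes (to_bits state nodes)

-- ===== LEMMAS AND PROOFS =====

theorem pv_foldl_append_map (l : List String) (f : String → Int) (acc : List Int) :
    l.foldl (fun b x => b ++ [f x]) acc = acc ++ l.map f := by
  induction l generalizing acc with
  | nil => simp
  | cons x xs ih => simp [List.foldl_cons, ih]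

theorem pv_index_fold_mem (ps : List (Int × String)) (d : PySem.Dict String (List Int))
    (t : String) (i : Int) :
    i ∈ (ps.foldl (fun d p => d.insert p.2 ((d.getD p.2 []) ++ [p.1])) d).getD t []
      ↔ i ∈ d.getD t [] ∨ (i, t) ∈ ps := by
  induction ps generalizing d with
  | nil => simp
  | cons p ps ih =>
      rcases p with ⟨pi, pt⟩
      simp only [List.foldl_cons, ih, PySem.Dict.getD_insert, List.mem_cons, Prod.mk.injEq]
      by_cases h : t = pt
      · subst h; simp; tauto
      · simp [h]

theorem pv_mem_index (nodes : List String) (t : String) (i : Int) :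
    i ∈ (pvBuildIndex nodes).getD t []
      ↔ ∃ (k : Nat) (h : k < nodes.length), i = (k : Int) ∧ nodes[k] = t := by
  unfold pvBuildIndex
  rw [pv_index_fold_mem]
  simp [PySem.List.mem_enumerate_iff, Prod.ext_iff]
  constructor
  · rintro ⟨k, hk, hik, hnk⟩
    exact ⟨k, hk, hik, hnk.symm⟩
  · rintro ⟨k, hk, hik, hnk⟩
    exact ⟨k, hk, hik, hnk.symm⟩

theorem pv_setOnes_length (ps : List Int) (b : List Int) :
    (pvSetOnes ps b).length = b.length := by
  unfold pvSetOnes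
  induction ps generalizing b with
  | nil => rfl
  | cons p ps ih => simp [List.foldl_cons, ih]

theorem pv_setOnes_getElem? (ps : List Int) (b : List Int) (j : Nat)
    (hnn : ∀ i ∈ ps, 0 ≤ i) :
    (pvSetOnes ps b)[j]? = if (j : Int) ∈ ps then (if j < b.length then some 1 else none) else b[j]? := by
  induction ps generalizing b with
  | nil => simp [pvSetOnes]
  | cons p ps ih =>
      have hp : 0 ≤ p := hnn p (by simp)
      have hps : ∀ i ∈ ps, 0 ≤ i := fun i hi => hnn i (by simp [hi])
      show (pvSetOnes ps (b.set p.toNat 1))[j]? = _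
      rw [ih _ hps]
      by_cases hmem : (j : Int) ∈ ps
      · simp [hmem, List.mem_cons, List.length_set]
      · by_cases hpj : p = (j : Int)
        · have hpt : p.toNat = j := by omega
          simp [hmem, hpj, List.getElem?_set]
        · have hne : p.toNat ≠ j := by omega
          have hpj' : ¬ ((j : Int) = p) := fun h => hpj h.symm
          simp [hmem, hpj', hne]

theorem pv_outer_fold_getElem? (idx : PySem.Dict String (List Int)) (ts : List String)
    (b : List Int) (j : Nat)
    (hnn : ∀ t i, i ∈ idx.getD t [] → 0 ≤ i) :
    (ts.foldl (fun b token => pvSetOnes (idx.getD token []) b) b)[j]?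
      = if ∃ t ∈ ts, (j : Int) ∈ idx.getD t [] then (if j < b.length then some 1 else none) else b[j]? := by
  induction ts generalizing b with
  | nil => simp
  | cons t ts ih =>
      simp only [List.foldl_cons]
      rw [ih]
      rw [pv_setOnes_getElem? _ _ _ (fun i hi => hnn t i hi)]
      rw [pv_setOnes_length]
      by_cases hex : ∃ t' ∈ ts, (j : Int) ∈ idx.getD t' []
      · have hex2 : ∃ t' ∈ t :: ts, (j : Int) ∈ idx.getD t' [] := by
          rcases hex with ⟨t', h1, h2⟩
          exact ⟨t', List.mem_cons_of_mem _ h1, h2⟩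
        simp only [if_pos hex, if_pos hex2]
      · by_cases hmem : (j : Int) ∈ idx.getD t []
        · have hex2 : ∃ t' ∈ t :: ts, (j : Int) ∈ idx.getD t' [] :=
            ⟨t, List.mem_cons_self, hmem⟩
          simp only [if_neg hex, if_pos hmem, if_pos hex2]
        · have hex2 : ¬ ∃ t' ∈ t :: ts, (j : Int) ∈ idx.getD t' [] := by
            rintro ⟨t', h1, h2⟩
            rcases List.mem_cons.1 h1 with rfl | h1
            · exact hmem h2
            · exact hex ⟨t', h1, h2⟩
          simp only [if_neg hex, if_neg hmem, if_neg hex2]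

-- ===== VERDICT (by name: the statement is the Claim_ definition above) =====
theorem to_bits_spec : Claim_equal_to_bits := by
  intro state nodes _
  unfold Spec_to_bits to_bits to_bits_alt
  by_cases hnil : state == "<nil>"
  · simp [hnil]
  · simp only [hnil, if_false, Bool.false_eq_true]
    set ts := pvSplitTokens state with hts
    rw [pv_foldl_append_map]
    apply List.ext_getElem?
    intro j
    rw [pv_outer_fold_getElem? _ _ _ _
      (fun t i hi => by
        rcases (pv_mem_index nodes t i).1 hi with ⟨k, hk, hik, _⟩
        omega)]
    simp only [List.length_replicate, List.nil_append]
    by_cases hj : j < nodes.length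
    · have hmemiff : (∃ t ∈ ts, (j : Int) ∈ (pvBuildIndex nodes).getD t []) ↔ nodes[j] ∈ ts := by
        constructor
        · rintro ⟨t, ht, hi⟩
          rcases (pv_mem_index nodes t (j : Int)).1 hi with ⟨k, hk, hik, hnk⟩
          have : k = j := by omega
          subst this
          rw [hnk]; exact ht
        · intro h
          exact ⟨nodes[j], h, (pv_mem_index nodes nodes[j] (j : Int)).2 ⟨j, hj, rfl, rfl⟩⟩
      by_cases hmem : nodes[j] ∈ ts
      · simp [hj, hmemiff, hmem]
      · simp [hj, hmemiff, hmem]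
    · have h1 : (List.map (fun node => if node ∈ ts then (1:Int) else 0) nodes)[j]? = none := by
        simp; omega
      have h2 : (List.replicate nodes.length (0:Int))[j]? = none := by
        simp; omega
      rw [h1]
      split
      · simp
      · exact h2.symm
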